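-- pv_equiv track=rewrite | github.com/rusuraluca/uni-computer-science | First Year/Programming Fundamentals/Seminar/Seminar 3/AP - Seminar 3/main.py | delete_sequence
-- ===== SOURCE A (Python) =====
-- def delete_sequence(my_list):
--     """
--     Delete the sequence between the first and last even number in the list.
--     :param my_list: list of integers
--     :return: new list
--     """
--     first_even, last_even = -1, -1
--     for i in range(0, len(my_list)):
--         if my_list[i] % 2 == 0 and first_even == -1:
--             first_even = i
--         elif my_list[i] % 2 == 0:
--             last_even = i
--
--     if first_even != -1:
--         if last_even == -1:
--             del my_list[first_even]
--         else:
--             del my_list[first_even:last_even + 1]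
--     return my_list
-- ===== SOURCE B (Python) =====
-- def delete_sequence(my_list):
--     """
--     Delete the sequence between the first and last even number in the list.
--     :param my_list: list of integers
--     :return: new list
--     """
--     def odd_prefix(xs):
--         # elements before the first even, or None if there is no even
--         out = []
--         for x in xs:
--             if x % 2 == 0:
--                 return out
--             out.append(x)
--         return None
--
--     head = odd_prefix(my_list)
--     if head is not None:
--         tail = odd_prefix(reversed(my_list))
--         my_list[:] = head + tail[::-1]
--     return my_list
-- ===== Notes on version B (the rewrite author's own statement) =====
-- stated objective: alternative
-- what changed: B uses no indices at all: a helper odd_prefix returns the elements before the first even (None if no even), applied to the list and to its reverse, and the result is rebuilt as odd-prefix + reversed odd-prefix-of-reverse, replacing A's index loop tracking first/last even positions and its single-vs-multiple-even case split.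
import Mathlib
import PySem

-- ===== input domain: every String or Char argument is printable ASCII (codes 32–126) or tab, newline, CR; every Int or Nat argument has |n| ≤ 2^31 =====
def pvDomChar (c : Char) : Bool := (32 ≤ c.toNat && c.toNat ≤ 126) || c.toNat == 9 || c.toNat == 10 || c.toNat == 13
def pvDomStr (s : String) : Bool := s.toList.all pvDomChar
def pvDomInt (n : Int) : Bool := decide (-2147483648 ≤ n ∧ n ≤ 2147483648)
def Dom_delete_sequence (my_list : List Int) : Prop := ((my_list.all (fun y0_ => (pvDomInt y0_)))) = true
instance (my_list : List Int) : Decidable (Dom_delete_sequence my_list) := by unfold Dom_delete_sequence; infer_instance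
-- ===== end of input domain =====

-- B works with no indices at all: it keeps the odd prefix of the list and the odd prefix of its
-- reverse (the elements after the last even) and rebuilds the result from those two pieces (alternative).
-- Both Pythons mutate my_list in place and return the same object; the mutation is identical,
-- and the theorems here are about the returned value.

-- ===== PORT A =====
-- the body of A's index loop, tracking (first_even, last_even)
def pvStepA (st : Int × Int) (i : Int) (x : Int) : Int × Int :=
  if PySem.Int.mod x 2 = 0 ∧ st.1 = -1 then (i, st.2)
  else if PySem.Int.mod x 2 = 0 then (st.1, i)
  else st

def delete_sequence (my_list : List Int) : List Int :=
  let st := (PySem.List.pyRange 0 (my_list.length : Int) 1).foldl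
    (fun st i => pvStepA st i (PySem.List.pyGetD my_list i 0)) (-1, -1)
  if st.1 ≠ -1 then
    if st.2 = -1 then
      -- del my_list[first_even]: exact here since first_even is an in-range index from range(0, len)
      my_list.take st.1.toNat ++ my_list.drop (st.1.toNat + 1)
    else
      -- del my_list[first_even:last_even + 1]
      PySem.List.slice my_list none (some st.1) ++ PySem.List.slice my_list (some (st.2 + 1)) none
  else my_list

-- ===== PORT B =====
-- B's helper odd_prefix: the elements before the first even, or None when there is no even
def pvOddPrefix : List Int → Option (List Int)
  | [] => none
  | x :: xs => if PySem.Int.mod x 2 = 0 then some [] else (pvOddPrefix xs).map (x :: ·)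

def delete_sequence_alt (my_list : List Int) : List Int :=
  match pvOddPrefix my_list with
  | some head =>
      -- tail = odd_prefix(reversed(my_list)); in Python it is never None here
      -- (head is not None means an even exists), so .getD [] is unreachable
      let tail := (pvOddPrefix my_list.reverse).getD []
      head ++ tail.reverse
  | none => my_list

-- ===== PRECONDITION & SPEC =====
def Spec_delete_sequence (my_list : List Int) (out : List Int) : Prop := out = delete_sequence_alt my_list
instance (my_list : List Int) (out : List Int) : Decidable (Spec_delete_sequence my_list out) := by unfold Spec_delete_sequence; infer_instance

-- ===== CLAIM (what is proved, stated in full; the proofs are below) =====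
def Claim_equal_delete_sequence : Prop := ∀ (my_list : List Int), Dom_delete_sequence my_list → Spec_delete_sequence my_list (delete_sequence my_list)

-- ===== LEMMAS AND PROOFS =====
-- proof-only predicate: x is odd
def podd (x : Int) : Bool := !decide ((2:Int) ∣ x)

-- proof-only: indices of the even elements of an enumerated list
def pvEvens (ps : List (Int × Int)) : List Int :=
  (ps.filter (fun p => PySem.Int.mod p.2 2 = 0)).map (·.1)

lemma pvOddPrefix_eq (xs : List Int) :
    pvOddPrefix xs = if ∀ x ∈ xs, podd x = true then none else some (xs.takeWhile podd) := by
  induction xs with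
  | nil => simp [pvOddPrefix]
  | cons x xs ih =>
    by_cases he : (2:Int) ∣ x
    · have hmod : PySem.Int.mod x 2 = 0 := (PySem.Int.mod_eq_zero_iff_dvd x 2).mpr he
      have hpx : podd x = false := by simp [podd, he]
      simp only [pvOddPrefix, if_pos hmod]
      rw [if_neg (fun hc => by simpa [hpx] using hc x List.mem_cons_self)]
      simp [List.takeWhile_cons, hpx]
    · have hm : ¬ PySem.Int.mod x 2 = 0 := fun h => he ((PySem.Int.mod_eq_zero_iff_dvd x 2).mp h)
      have hp : podd x = true := by simp [podd, he]
      have hcons : (∀ y ∈ x :: xs, podd y = true) ↔ (∀ y ∈ xs, podd y = true) := by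
        simp [List.forall_mem_cons, hp]
      simp only [pvOddPrefix, if_neg hm, ih, List.takeWhile_cons, hp, if_true]
      by_cases hall : ∀ y ∈ xs, podd y = true
      · rw [if_pos hall, if_pos (hcons.mpr hall)]; rfl
      · rw [if_neg hall, if_neg (fun hc => hall (hcons.mp hc))]; rfl

lemma pvStepA_even_found (f l i x : Int) (hf : f ≠ -1) (he : PySem.Int.mod x 2 = 0) :
    pvStepA (f, l) i x = (f, i) := by
  have he' : (2:Int) ∣ x := (PySem.Int.mod_eq_zero_iff_dvd x 2).mp he
  simp [pvStepA, he', hf]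

lemma pvStepA_even_new (l i x : Int) (he : PySem.Int.mod x 2 = 0) :
    pvStepA (-1, l) i x = (i, l) := by
  have he' : (2:Int) ∣ x := (PySem.Int.mod_eq_zero_iff_dvd x 2).mp he
  simp [pvStepA, he']

lemma pvStepA_odd (st : Int × Int) (i x : Int) (ho : ¬ PySem.Int.mod x 2 = 0) :
    pvStepA st i x = st := by
  have ho' : ¬ (2:Int) ∣ x := fun h => ho ((PySem.Int.mod_eq_zero_iff_dvd x 2).mpr h)
  simp [pvStepA, ho']

lemma pvEvens_cons_even (p : Int × Int) (ps : List (Int × Int)) (he : PySem.Int.mod p.2 2 = 0) :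
    pvEvens (p :: ps) = p.1 :: pvEvens ps := by
  have he' : (2:Int) ∣ p.2 := (PySem.Int.mod_eq_zero_iff_dvd p.2 2).mp he
  simp [pvEvens, he']

lemma pvEvens_cons_odd (p : Int × Int) (ps : List (Int × Int)) (ho : ¬ PySem.Int.mod p.2 2 = 0) :
    pvEvens (p :: ps) = pvEvens ps := by
  have ho' : ¬ (2:Int) ∣ p.2 := fun h => ho ((PySem.Int.mod_eq_zero_iff_dvd p.2 2).mpr h)
  simp [pvEvens, ho']

-- bridge: the index loop over range(0, len) equals a fold over enumerate
lemma pvFold_range_enum (xs : List Int) (g : Int × Int → Int → Int → Int × Int) :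
    ∀ (n k : Nat) (init : Int × Int), xs.length - k = n → k ≤ xs.length →
    (PySem.List.pyRange (k : Int) (xs.length : Int) 1).foldl
        (fun st i => g st i (PySem.List.pyGetD xs i 0)) init
    = (PySem.List.enumerate (xs.drop k) (k : Int)).foldl (fun st p => g st p.1 p.2) init := by
  intro n
  induction n with
  | zero =>
    intro k init h hk
    have hk' : k = xs.length := by omega
    subst hk'
    rw [PySem.List.pyRange_one_eq_nil le_rfl]
    simp
  | succ m ih =>
    intro k init h hk
    have hlt : k < xs.length := by omega
    rw [PySem.List.pyRange_one_cons (by exact_mod_cast hlt)]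
    rw [List.drop_eq_getElem_cons hlt, PySem.List.enumerate_cons]
    simp only [List.foldl_cons]
    have hget : PySem.List.pyGetD xs (k : Int) 0 = xs[k] := by
      rw [PySem.List.pyGetD_natCast]
      exact List.getD_eq_getElem xs 0 hlt
    rw [hget]
    have := ih (k + 1) (g init (k : Int) xs[k]) (by omega) (by omega)
    push_cast at this ⊢
    exact this

lemma pvFoldA_found (ps : List (Int × Int)) :
    ∀ (f l : Int), f ≠ -1 →
    ps.foldl (fun st p => pvStepA st p.1 p.2) (f, l) = (f, (pvEvens ps).getLastD l) := by
  induction ps with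
  | nil => intro f l _; simp [pvEvens]
  | cons p ps ih =>
    intro f l hf
    by_cases he : PySem.Int.mod p.2 2 = 0
    · rw [List.foldl_cons, pvStepA_even_found f l p.1 p.2 hf he, ih f p.1 hf,
        pvEvens_cons_even p ps he, List.getLastD_cons]
    · rw [List.foldl_cons, pvStepA_odd (f, l) p.1 p.2 he, ih f l hf,
        pvEvens_cons_odd p ps he]

lemma pvEnum_fst_ge (xs : List Int) : ∀ (s : Int), ∀ p ∈ PySem.List.enumerate xs s, s ≤ p.1 := by
  induction xs with
  | nil => intro s p hp; simp [PySem.List.enumerate_nil] at hp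
  | cons x xs ih =>
    intro s p hp
    rw [PySem.List.enumerate_cons] at hp
    rcases List.mem_cons.mp hp with h | h
    · subst h; simp
    · have := ih (s + 1) p h; omega

lemma pvFoldA_start (ps : List (Int × Int)) (hpos : ∀ p ∈ ps, 0 ≤ p.1) :
    ps.foldl (fun st p => pvStepA st p.1 p.2) (-1, -1)
    = match pvEvens ps with
      | [] => ((-1 : Int), (-1 : Int))
      | e :: rest => (e, rest.getLastD (-1)) := by
  induction ps with
  | nil => simp [pvEvens]
  | cons p ps ih =>
    by_cases he : PySem.Int.mod p.2 2 = 0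
    · have hp : (0:Int) ≤ p.1 := hpos p (List.mem_cons_self)
      rw [List.foldl_cons, pvStepA_even_new (-1) p.1 p.2 he,
        pvFoldA_found ps p.1 (-1) (by omega), pvEvens_cons_even p ps he]
    · rw [List.foldl_cons, pvStepA_odd _ p.1 p.2 he, pvEvens_cons_odd p ps he]
      exact ih (fun q hq => hpos q (List.mem_cons_of_mem p hq))

-- pvEvens of an enumeration is empty exactly when every element is odd
lemma pvEvens_nil_iff (xs : List Int) :
    ∀ s : Int, (pvEvens (PySem.List.enumerate xs s) = [] ↔ ∀ x ∈ xs, podd x = true) := by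
  induction xs with
  | nil => intro s; simp [PySem.List.enumerate_nil, pvEvens]
  | cons x xs ih =>
    intro s
    rw [PySem.List.enumerate_cons]
    by_cases he : PySem.Int.mod x 2 = 0
    · have he' : (2:Int) ∣ x := (PySem.Int.mod_eq_zero_iff_dvd x 2).mp he
      rw [pvEvens_cons_even (s, x) _ he]
      simp [podd, he']
    · have he' : ¬ (2:Int) ∣ x := fun h => he ((PySem.Int.mod_eq_zero_iff_dvd x 2).mpr h)
      rw [pvEvens_cons_odd (s, x) _ he]
      have hpx : podd x = true := by simp [podd, he']
      rw [ih (s + 1)]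
      simp [hpx]

-- the head of pvEvens is the start offset plus the length of the odd prefix
lemma pvEvens_head (xs : List Int) :
    ∀ (s e : Int) (rest : List Int), pvEvens (PySem.List.enumerate xs s) = e :: rest →
    e = s + ((xs.takeWhile podd).length : Int) := by
  induction xs with
  | nil => intro s e rest h; simp [PySem.List.enumerate_nil, pvEvens] at h
  | cons x xs ih =>
    intro s e rest h
    rw [PySem.List.enumerate_cons] at h
    by_cases he : PySem.Int.mod x 2 = 0
    · have he' : (2:Int) ∣ x := (PySem.Int.mod_eq_zero_iff_dvd x 2).mp he
      rw [pvEvens_cons_even (s, x) _ he] at h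
      have hp : podd x = false := by simp [podd, he']
      have := (List.cons.injEq _ _ _ _).mp h
      simp [List.takeWhile_cons, hp, ← this.1]
    · have he' : ¬ (2:Int) ∣ x := fun h => he ((PySem.Int.mod_eq_zero_iff_dvd x 2).mpr h)
      rw [pvEvens_cons_odd (s, x) _ he] at h
      have hp : podd x = true := by simp [podd, he']
      have := ih (s + 1) e rest h
      simp only [List.takeWhile_cons, hp, if_true, List.length_cons] at *
      push_cast
      omega

lemma pv_takeWhile_append_all {α : Type} (p : α → Bool) (ys zs : List α)
    (h : ∀ y ∈ ys, p y = true) : (ys ++ zs).takeWhile p = ys ++ zs.takeWhile p := by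
  induction ys with
  | nil => simp
  | cons y ys ih =>
    have hy := h y (List.mem_cons_self)
    simp [List.takeWhile_cons, hy, ih (fun a ha => h a (List.mem_cons_of_mem y ha))]

lemma pv_takeWhile_append_break {α : Type} (p : α → Bool) (ys zs : List α)
    (h : ¬ ∀ y ∈ ys, p y = true) : (ys ++ zs).takeWhile p = ys.takeWhile p := by
  induction ys with
  | nil => exact absurd (by simp) h
  | cons y ys ih =>
    by_cases hy : p y = true
    · have h' : ¬ ∀ a ∈ ys, p a = true := fun hall => h (List.forall_mem_cons.mpr ⟨hy, hall⟩)
      simp [List.takeWhile_cons, hy, ih h']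
    · simp [List.takeWhile_cons, hy]

-- getLastD of a nonempty list does not depend on the default
lemma pv_getLastD_ne {α : Type} (l : List α) (d d' : α) (h : l ≠ []) :
    l.getLastD d = l.getLastD d' := by
  cases l with
  | nil => exact absurd rfl h
  | cons a l => simp [List.getLastD_eq_getLast?, List.getLast?_eq_some_getLast]

-- the last element of pvEvens, in terms of the odd suffix (= odd prefix of the reverse)
lemma pvEvens_last (xs : List Int) :
    ∀ (s : Int), pvEvens (PySem.List.enumerate xs s) ≠ [] →
    (pvEvens (PySem.List.enumerate xs s)).getLastD (-1)
      = s + (xs.length : Int) - 1 - ((xs.reverse.takeWhile podd).length : Int) := by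
  induction xs with
  | nil => intro s h; simp [PySem.List.enumerate_nil, pvEvens] at h
  | cons x xs ih =>
    intro s h
    have hrev : (x :: xs).reverse = xs.reverse ++ [x] := by simp
    by_cases hx : PySem.Int.mod x 2 = 0
    · have hx' : (2:Int) ∣ x := (PySem.Int.mod_eq_zero_iff_dvd x 2).mp hx
      have hpx : podd x = false := by simp [podd, hx']
      rw [PySem.List.enumerate_cons, pvEvens_cons_even (s, x) _ hx, List.getLastD_cons]
      by_cases hE : pvEvens (PySem.List.enumerate xs (s + 1)) = []
      · have hall : ∀ y ∈ xs, podd y = true := (pvEvens_nil_iff xs (s + 1)).mp hE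
        have hallr : ∀ y ∈ xs.reverse, podd y = true := by
          intro y hy; exact hall y (List.mem_reverse.mp hy)
        have h1 : xs.reverse ++ List.takeWhile podd [x] = xs.reverse := by
          simp [List.takeWhile_cons, hpx]
        rw [hrev, pv_takeWhile_append_all podd _ _ hallr, h1]
        simp only [hE, List.getLastD_nil, List.length_cons, List.length_reverse]
        push_cast
        omega
      · rw [pv_getLastD_ne _ s (-1) hE, ih (s + 1) hE]
        have hnall : ¬ ∀ y ∈ xs, podd y = true := fun hall =>
          hE ((pvEvens_nil_iff xs (s + 1)).mpr hall)
        have hnallr : ¬ ∀ y ∈ xs.reverse, podd y = true := by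
          intro hall; exact hnall (fun y hy => hall y (List.mem_reverse.mpr hy))
        rw [hrev, pv_takeWhile_append_break podd _ _ hnallr]
        simp only [List.length_cons]
        push_cast
        omega
    · have hx' : ¬ (2:Int) ∣ x := fun hd => hx ((PySem.Int.mod_eq_zero_iff_dvd x 2).mpr hd)
      rw [PySem.List.enumerate_cons, pvEvens_cons_odd (s, x) _ hx] at h ⊢
      have hnall : ¬ ∀ y ∈ xs, podd y = true := fun hall =>
        h ((pvEvens_nil_iff xs (s + 1)).mpr hall)
      have hnallr : ¬ ∀ y ∈ xs.reverse, podd y = true := by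
        intro hall; exact hnall (fun y hy => hall y (List.mem_reverse.mpr hy))
      rw [ih (s + 1) h, hrev, pv_takeWhile_append_break podd _ _ hnallr]
      simp only [List.length_cons]
      push_cast
      omega

lemma pv_takeWhile_length_lt (xs : List Int) (hnall : ¬ ∀ y ∈ xs, podd y = true) :
    (xs.takeWhile podd).length < xs.length := by
  have hpre := List.takeWhile_prefix (l := xs) podd
  have hle := hpre.length_le
  rcases lt_or_eq_of_le hle with h | h
  · exact h
  · exact absurd (List.takeWhile_eq_self_iff.mp (hpre.eq_of_length h)) hnall

lemma pv_drop_reverse_takeWhile (xs : List Int) (k : Nat) (_hk : k ≤ xs.length) :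
    xs.drop (xs.length - k) = (xs.reverse.take k).reverse := by
  have h2 : (List.take k xs.reverse).reverse
      = List.drop (xs.reverse.length - k) xs.reverse.reverse := by
    simp [List.reverse_take]
  simpa using h2.symm

-- ===== VERDICT (by name: the statement is the Claim_ definition above) =====
theorem delete_sequence_spec : Claim_equal_delete_sequence := by
  intro xs _
  unfold Spec_delete_sequence delete_sequence delete_sequence_alt
  have hbr := pvFold_range_enum xs pvStepA xs.length 0 (-1, -1) (by omega) (by omega)
  norm_num at hbr
  rw [hbr, pvFoldA_start (PySem.List.enumerate xs 0) (fun p hp => pvEnum_fst_ge xs 0 p hp)]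
  cases hE : pvEvens (PySem.List.enumerate xs 0) with
  | nil =>
    have hall : ∀ y ∈ xs, podd y = true := (pvEvens_nil_iff xs 0).mp hE
    rw [pvOddPrefix_eq, if_pos hall]
    simp
  | cons e rest =>
    have hne : pvEvens (PySem.List.enumerate xs 0) ≠ [] := by simp [hE]
    have hnall : ¬ ∀ y ∈ xs, podd y = true := fun hall =>
      hne ((pvEvens_nil_iff xs 0).mpr hall)
    have hnallr : ¬ ∀ y ∈ xs.reverse, podd y = true := by
      intro hall; exact hnall (fun y hy => hall y (List.mem_reverse.mpr hy))
    -- B's two pieces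
    rw [pvOddPrefix_eq, pvOddPrefix_eq, if_neg hnall, if_neg hnallr]
    dsimp only [Option.getD_some]
    -- A's first and last indices
    have hhead : e = ((xs.takeWhile podd).length : Int) := by
      have := pvEvens_head xs 0 e rest hE
      omega
    have hlast := pvEvens_last xs 0 hne
    rw [hE] at hlast
    set T1 : Nat := (xs.takeWhile podd).length with hT1
    set T2 : Nat := (xs.reverse.takeWhile podd).length with hT2
    have hT1lt : T1 < xs.length := pv_takeWhile_length_lt xs hnall
    have hT2lt : T2 < xs.length := by
      have := pv_takeWhile_length_lt xs.reverse hnallr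
      simpa using this
    have htake : xs.take T1 = xs.takeWhile podd :=
      (List.prefix_iff_eq_take.mp (List.takeWhile_prefix podd)).symm
    have hdrop : xs.drop (xs.length - T2) = (xs.reverse.takeWhile podd).reverse := by
      rw [pv_drop_reverse_takeWhile xs T2 (by omega)]
      congr 1
      exact (List.prefix_iff_eq_take.mp (List.takeWhile_prefix podd)).symm
    have hne1 : ¬ e = -1 := by
      rw [hhead]; omega
    cases rest with
    | nil =>
      -- exactly one even: A takes the single-delete branch
      have hL : e = (xs.length : Int) - 1 - (T2 : Int) := by
        rw [List.getLastD_cons, List.getLastD_nil] at hlast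
        omega
      simp only [ne_eq, hne1, not_false_eq_true, if_true, List.getLastD_nil]
      have het : e.toNat = T1 := by omega
      have het1 : T1 + 1 = xs.length - T2 := by omega
      rw [het, het1, htake, hdrop]
    | cons r rest' =>
      have hL : (r :: rest').getLastD (-1) = (xs.length : Int) - 1 - (T2 : Int) := by
        rw [List.getLastD_cons] at hlast
        rw [pv_getLastD_ne (r :: rest') (-1) e (by simp), hlast]
        ring
      have hLne : ¬ (r :: rest').getLastD (-1) = -1 := by
        rw [hL]; omega
      simp only [ne_eq, hne1, not_false_eq_true, if_true, hLne, if_false]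
      rw [hL, PySem.List.slice_to xs (by rw [hhead]; positivity),
        PySem.List.slice_from xs (by omega)]
      have het : e.toNat = T1 := by omega
      have het1 : ((xs.length : Int) - 1 - (T2 : Int) + 1).toNat = xs.length - T2 := by omega
      rw [het, het1, htake, hdrop]
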